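-- pv_equiv track=rewrite | github.com/bigdata-ustc/DisenQNet | src/dataset/utils.py | get_equal_label_indexes
-- ===== SOURCE A (Python) =====
-- def get_equal_label_indexes(sorted_labels):
--     # [a, a, a, b, b, c, c, c] => [(0, 1, 2), (3, 4), (5, 6, 7)]
--     equal_label_indexes = []
--     idx_group = []
--     group_label = None
--     for idx, label in enumerate(sorted_labels):
--         if len(idx_group) == 0:
--             idx_group.append(idx)
--             group_label = label
--         elif label == group_label:
--             idx_group.append(idx)
--         else:
--             equal_label_indexes.append(idx_group)
--             idx_group = []
--             idx_group.append(idx)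
--             group_label = label
--     equal_label_indexes.append(idx_group)
--     return equal_label_indexes
-- ===== SOURCE B (Python) =====
-- def get_equal_label_indexes(sorted_labels):
--     # Two-phase: run-length encode by comparing neighbours, then expand runs to index ranges.
--     # On the empty list returns [] (no groups); A returns [[]] there.
--     if not sorted_labels:
--         return []
--     runs = []
--     count = 1
--     for prev, cur in zip(sorted_labels, sorted_labels[1:]):
--         if cur == prev:
--             count += 1
--         else:
--             runs.append(count)
--             count = 1
--     runs.append(count)
--     result = []
--     start = 0
--     for r in runs:
--         result.append(list(range(start, start + r)))
--         start += r
--     return result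
-- ===== Notes on version B (the rewrite author's own statement) =====
-- stated objective: alternative
-- what changed: Replaces A's single state machine (current group list + group label, flushed on label change) by two passes with no label state: a run-length encoding built by comparing each element with its neighbour via zip, then an expansion of the run lengths into index ranges.
-- intended difference: On the empty list A's unconditional final append returns [[]] (one group with no indexes), while B returns [], the intended 'no groups' value. — e.g. on get_equal_label_indexes([]): A returns [[]], B returns []
import Mathlib
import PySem

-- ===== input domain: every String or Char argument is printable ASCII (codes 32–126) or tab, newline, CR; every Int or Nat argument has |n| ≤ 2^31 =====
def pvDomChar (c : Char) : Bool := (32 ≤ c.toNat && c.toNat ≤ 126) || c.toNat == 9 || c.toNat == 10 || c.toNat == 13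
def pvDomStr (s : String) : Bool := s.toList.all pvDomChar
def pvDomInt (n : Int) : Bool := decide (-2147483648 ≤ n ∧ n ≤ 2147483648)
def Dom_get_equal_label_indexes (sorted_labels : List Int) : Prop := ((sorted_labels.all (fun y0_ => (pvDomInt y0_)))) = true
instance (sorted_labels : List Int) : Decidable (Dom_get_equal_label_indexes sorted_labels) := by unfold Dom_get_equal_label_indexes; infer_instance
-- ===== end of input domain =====

-- B groups indexes of consecutive equal labels by run-length encoding + range expansion instead of A's
-- group-label state machine (alternative decomposition, same O(n) cost); on [] B returns [] where A returns [[]].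

-- ===== PORT A =====
-- A's for-loop over enumerate(sorted_labels) with state (equal_label_indexes, idx_group, group_label)
def geliLoopA (xs : List Int) (idx : Int) (eli : List (List Int)) (grp : List Int)
    (gl : Option Int) : List (List Int) × List Int :=
  match xs with
  | [] => (eli, grp)
  | label :: rest =>
    if grp.length = 0 then
      geliLoopA rest (idx + 1) eli (grp ++ [idx]) (some label)
    else if some label = gl then
      geliLoopA rest (idx + 1) eli (grp ++ [idx]) gl
    else
      geliLoopA rest (idx + 1) (eli ++ [grp]) [idx] (some label)

def get_equal_label_indexes (sorted_labels : List Int) : List (List Int) :=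
  let r := geliLoopA sorted_labels 0 [] [] none
  r.1 ++ [r.2]

-- ===== PORT B =====
-- B's first loop: for prev, cur in zip(xs, xs[1:]) with state (runs, count)
def runsLoopB (pairs : List (Int × Int)) (runs : List Int) (count : Int) : List Int × Int :=
  match pairs with
  | [] => (runs, count)
  | (prev, cur) :: rest =>
    if cur = prev then runsLoopB rest runs (count + 1)
    else runsLoopB rest (runs ++ [count]) 1

-- B's second loop: for r in runs with state (result, start)
def expandLoopB (runs : List Int) (result : List (List Int)) (start : Int) :
    List (List Int) × Int :=
  match runs with
  | [] => (result, start)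
  | r :: rest => expandLoopB rest (result ++ [PySem.List.pyRange start (start + r) 1]) (start + r)

def get_equal_label_indexes_alt (sorted_labels : List Int) : List (List Int) :=
  if sorted_labels = [] then []
  else
    let rc := runsLoopB (sorted_labels.zip (PySem.List.slice sorted_labels (some 1) none)) [] 1
    let runs := rc.1 ++ [rc.2]
    (expandLoopB runs [] 0).1

-- ===== PRECONDITION & SPEC =====
-- On the empty list A's unconditional final append returns [[]] (one group with no indexes),
-- while B returns [], the intended 'no groups' value.
def D_get_equal_label_indexes (sorted_labels : List Int) : Prop := sorted_labels = []
instance (sorted_labels : List Int) : Decidable (D_get_equal_label_indexes sorted_labels) := by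
  unfold D_get_equal_label_indexes; infer_instance

def Spec_get_equal_label_indexes (sorted_labels : List Int) (out : List (List Int)) : Prop :=
  ¬ D_get_equal_label_indexes sorted_labels → out = get_equal_label_indexes_alt sorted_labels
instance (sorted_labels : List Int) (out : List (List Int)) :
    Decidable (Spec_get_equal_label_indexes sorted_labels out) := by
  unfold Spec_get_equal_label_indexes; infer_instance

def pvDiffWitness_get_equal_label_indexes : List Int := []
def pvDiffWitnessOut_get_equal_label_indexes : (List (List Int)) × (List (List Int)) := ([[]], [])

-- ===== CLAIM (what is proved, stated in full; the proofs are below) =====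
def Claim_unchanged_get_equal_label_indexes : Prop := ∀ (sorted_labels : List Int), Dom_get_equal_label_indexes sorted_labels → Spec_get_equal_label_indexes sorted_labels (get_equal_label_indexes sorted_labels)
def Claim_changed_get_equal_label_indexes : Prop := Dom_get_equal_label_indexes (pvDiffWitness_get_equal_label_indexes) ∧ D_get_equal_label_indexes (pvDiffWitness_get_equal_label_indexes) ∧ get_equal_label_indexes (pvDiffWitness_get_equal_label_indexes) = pvDiffWitnessOut_get_equal_label_indexes.1 ∧ get_equal_label_indexes_alt (pvDiffWitness_get_equal_label_indexes) = pvDiffWitnessOut_get_equal_label_indexes.2 ∧ pvDiffWitnessOut_get_equal_label_indexes.1 ≠ pvDiffWitnessOut_get_equal_label_indexes.2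
def Claim_exact_get_equal_label_indexes : Prop := ∀ (sorted_labels : List Int), Dom_get_equal_label_indexes sorted_labels → D_get_equal_label_indexes sorted_labels → get_equal_label_indexes sorted_labels ≠ get_equal_label_indexes_alt sorted_labels

-- ===== LEMMAS AND PROOFS =====

-- reference grouping function both ports are reduced to
def gref (xs : List Int) (k : Int) (cur : List Int) (g : Int) : List (List Int) :=
  match xs with
  | [] => [cur]
  | a :: rest =>
    if a = g then gref rest (k + 1) (cur ++ [k]) g
    else cur :: gref rest (k + 1) [k] a

theorem geliLoopA_eq_gref (xs : List Int) : ∀ (k : Int) (eli : List (List Int))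
    (cur : List Int) (g : Int), cur ≠ [] →
    (geliLoopA xs k eli cur (some g)).1 ++ [(geliLoopA xs k eli cur (some g)).2]
      = eli ++ gref xs k cur g := by
  induction xs with
  | nil => intro k eli cur g _; simp [geliLoopA, gref]
  | cons a rest ih =>
    intro k eli cur g hcur
    have hlen : ¬ cur.length = 0 := by simpa using hcur
    by_cases hag : a = g
    · simp only [geliLoopA, gref, hlen, if_false, hag, if_true]
      exact ih (k + 1) eli (cur ++ [k]) g (by simp)
    · have hne : ¬ (some a = some g) := by simpa using hag
      simp only [geliLoopA, gref, hlen, if_false, hne, if_neg hag]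
      rw [ih (k + 1) (eli ++ [cur]) [k] a (by simp)]
      simp

-- structural forms of B's two accumulator loops
def runsRec : List (Int × Int) → Int → List Int
  | [], c => [c]
  | (prev, cur) :: rest, c =>
    if cur = prev then runsRec rest (c + 1) else c :: runsRec rest 1

def expandRec : List Int → Int → List (List Int)
  | [], _ => []
  | r :: rest, start => PySem.List.pyRange start (start + r) 1 :: expandRec rest (start + r)

theorem runsLoopB_eq (pairs : List (Int × Int)) : ∀ (runs : List Int) (c : Int),
    (runsLoopB pairs runs c).1 ++ [(runsLoopB pairs runs c).2] = runs ++ runsRec pairs c := by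
  induction pairs with
  | nil => intro runs c; simp [runsLoopB, runsRec]
  | cons p rest ih =>
    intro runs c
    obtain ⟨prev, cur⟩ := p
    by_cases h : cur = prev
    · simp only [runsLoopB, runsRec, if_pos h]; exact ih runs (c + 1)
    · simp only [runsLoopB, runsRec, if_neg h]; rw [ih (runs ++ [c]) 1]; simp

theorem expandLoopB_eq (rs : List Int) : ∀ (result : List (List Int)) (start : Int),
    (expandLoopB rs result start).1 = result ++ expandRec rs start := by
  induction rs with
  | nil => intro result start; simp [expandLoopB, expandRec]
  | cons r rest ih =>
    intro result start
    simp only [expandLoopB, expandRec]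
    rw [ih (result ++ [PySem.List.pyRange start (start + r) 1]) (start + r)]
    simp

theorem gref_eq_expand (rest : List Int) : ∀ (g k c : Int), 1 ≤ c →
    gref rest k (PySem.List.pyRange (k - c) k 1) g
      = expandRec (runsRec ((g :: rest).zip rest) c) (k - c) := by
  induction rest with
  | nil =>
    intro g k c _
    have : k - c + c = k := by ring
    simp [gref, runsRec, expandRec, this]
  | cons b rest' ih =>
    intro g k c hc
    rw [List.zip_cons_cons]
    by_cases hbg : b = g
    · simp only [gref, runsRec, hbg, if_true]
      have hr : PySem.List.pyRange (k - c) k 1 ++ [k] = PySem.List.pyRange (k - c) (k + 1) 1 := by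
        rw [PySem.List.pyRange_one_succ_right (by omega)]
      rw [hr]
      have := ih g (k + 1) (c + 1) (by omega)
      have hk : k + 1 - (c + 1) = k - c := by ring
      rw [hk] at this
      exact this
    · simp only [gref, runsRec, if_neg hbg]
      have hr : k - c + c = k := by ring
      simp only [expandRec, hr]
      have := ih b (k + 1) 1 le_rfl
      have hk : k + 1 - 1 = k := by ring
      rw [hk, PySem.List.pyRange_one_singleton] at this
      rw [this]

-- ===== VERDICT (by name: the statement is the Claim_ definition above) =====
theorem get_equal_label_indexes_spec : Claim_unchanged_get_equal_label_indexes := by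
  intro xs _ hD
  match xs, hD with
  | a :: rest, _ =>
    show (geliLoopA (a :: rest) 0 [] [] none).1 ++ [(geliLoopA (a :: rest) 0 [] [] none).2] = _
    have h1 : geliLoopA (a :: rest) 0 [] [] none = geliLoopA rest 1 [] [0] (some a) := by
      simp [geliLoopA]
    rw [h1, geliLoopA_eq_gref rest 1 [] [0] a (by simp)]
    unfold get_equal_label_indexes_alt
    rw [if_neg (by simp)]
    rw [PySem.List.slice_from_one]
    rw [expandLoopB_eq, runsLoopB_eq]
    have := gref_eq_expand rest a 1 1 le_rfl
    norm_num at this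
    have h0 : PySem.List.pyRange 0 1 1 = [(0 : Int)] := by decide
    rw [h0] at this
    simpa using this

theorem get_equal_label_indexes_changed : Claim_changed_get_equal_label_indexes := by
  unfold Claim_changed_get_equal_label_indexes; decide

theorem get_equal_label_indexes_tight : Claim_exact_get_equal_label_indexes := by
  intro xs _ hD
  subst hD
  decide
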